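-- pv_equiv track=rewrite | github.com/MykolaIvanowski/LFM | exampls/longest_common_prefix_14.py | new_longest_common_prefix
-- ===== SOURCE A (Python) =====
-- def new_longest_common_prefix(strs):
--     strs.sort()
--     x = len(strs[0]) if len(strs[0]) < len(strs[-1]) else len(strs[-1])
--     prefix_count = 0
--     for i in range(x):
--         if strs[0][i] == strs[-1][i]:
--             prefix_count += 1
--         else:
--             break
--     prefix = strs[0][0:prefix_count]
--     return prefix
-- ===== SOURCE B (Python) =====
-- def new_longest_common_prefix(strs):
--     # Vertical scanning: advance a column index while every string agrees with
--     # strs[0] at that column; no sorting, no pairwise comparison of extremes.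
--     first = strs[0]
--     i = 0
--     while i < len(first) and all(i < len(s) and s[i] == first[i] for s in strs):
--         i += 1
--     return first[:i]
-- ===== Notes on version B (the rewrite author's own statement) =====
-- stated objective: alternative
-- what changed: B drops A's full sort-then-compare-extremes approach and does a vertical scan: it advances a column index while every string agrees with strs[0] at that column; A also mutates its argument by sorting it in place, B does not.
import Mathlib
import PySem

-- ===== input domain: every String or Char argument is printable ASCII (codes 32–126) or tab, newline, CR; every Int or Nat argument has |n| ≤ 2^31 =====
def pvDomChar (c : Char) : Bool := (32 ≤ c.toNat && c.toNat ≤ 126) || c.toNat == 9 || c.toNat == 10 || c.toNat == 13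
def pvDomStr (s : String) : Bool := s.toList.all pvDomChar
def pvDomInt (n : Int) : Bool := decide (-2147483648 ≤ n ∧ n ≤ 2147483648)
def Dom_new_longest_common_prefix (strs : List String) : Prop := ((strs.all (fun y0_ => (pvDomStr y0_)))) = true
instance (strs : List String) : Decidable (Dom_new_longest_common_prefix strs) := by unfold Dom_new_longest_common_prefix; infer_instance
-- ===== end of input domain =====

-- B replaces A's sort-then-compare-first-and-last by a vertical scan (advance a column index while
-- every string agrees with strs[0] at that column); note A also MUTATES its argument (sorts it in
-- place), B does not — the equivalence proved here is about the return value only.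


-- ===== PORT A =====
-- 'for i in range(x): if strs[0][i] == strs[-1][i]: prefix_count += 1 else: break'
-- fuel = number of remaining loop iterations (= x - i); indexing a[i] for 0 ≤ i via pyGetD.
def lcpLoopA (a b : List Char) : Nat → Nat → Nat → Nat
  | _, 0, cnt => cnt
  | i, fuel+1, cnt =>
      if PySem.List.pyGetD a (i : Int) ' ' = PySem.List.pyGetD b (i : Int) ' ' then
        lcpLoopA a b (i+1) fuel (cnt+1)
      else cnt

def new_longest_common_prefix (strs : List String) : String :=
  let s := PySem.List.sorted strs (fun x => x) false
  let first := (PySem.List.pyGetD s 0 "").toList       -- strs[0]   (Pre_: strs nonempty)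
  let lastS := (PySem.List.pyGetD s (-1) "").toList    -- strs[-1]
  let x : Int := if PySem.Chars.len first < PySem.Chars.len lastS then PySem.Chars.len first
                 else PySem.Chars.len lastS
  let prefix_count := lcpLoopA first lastS 0 x.toNat 0
  String.mk (PySem.List.slice first (some 0) (some (prefix_count : Int)))   -- strs[0][0:prefix_count]

-- ===== PORT B =====
-- 'i < len(first) and all(i < len(s) and s[i] == first[i] for s in strs)'; s[i] with 0 ≤ i < len(s) is getD
def bCond (strs : List String) (first : List Char) (i : Nat) : Bool :=
  decide (i < first.length) &&
    strs.all (fun s => decide (i < s.toList.length) && (s.toList.getD i ' ' == first.getD i ' '))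

-- the while loop; fuel = len(first)+1 bounds its iteration count (the guard has i < len(first))
def bLoop (strs : List String) (first : List Char) : Nat → Nat → Nat
  | i, 0 => i
  | i, fuel+1 => if bCond strs first i then bLoop strs first (i+1) fuel else i

def new_longest_common_prefix_alt (strs : List String) : String :=
  let first := (PySem.List.pyGetD strs 0 "").toList    -- strs[0]   (Pre_: strs nonempty)
  let i := bLoop strs first 0 (first.length + 1)
  String.mk (first.take i)                             -- first[:i] with 0 ≤ i

-- ===== PRECONDITION & SPEC =====
-- A raises IndexError on the empty list (strs[0]); B raises there too (strs[0]).
def Pre_new_longest_common_prefix (strs : List String) : Prop := strs ≠ []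
instance (strs : List String) : Decidable (Pre_new_longest_common_prefix strs) := by
  unfold Pre_new_longest_common_prefix; infer_instance
def pvWitness_new_longest_common_prefix : List String := ["flow", "flower", "flight"]

def Spec_new_longest_common_prefix (strs : List String) (out : String) : Prop := out = new_longest_common_prefix_alt strs
instance (strs : List String) (out : String) : Decidable (Spec_new_longest_common_prefix strs out) := by unfold Spec_new_longest_common_prefix; infer_instance

-- ===== CLAIM (what is proved, stated in full; the proofs are below) =====
def Claim_equal_new_longest_common_prefix : Prop := ∀ (strs : List String), Dom_new_longest_common_prefix strs → Pre_new_longest_common_prefix strs → Spec_new_longest_common_prefix strs (new_longest_common_prefix strs)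

-- ===== LEMMAS AND PROOFS =====

-- the common prefix of two character lists (the value both programs compute, used only in proofs)
def lcpChars : List Char → List Char → List Char
  | c :: a, d :: b => if c = d then c :: lcpChars a b else []
  | _, _ => []

-- ----- A's loop computes lcpChars -----
theorem lcpLoopA_shift (c d : Char) (a b : List Char) :
    ∀ (fuel i cnt : Nat), lcpLoopA (c :: a) (d :: b) (i+1) fuel cnt = lcpLoopA a b i fuel cnt := by
  intro fuel
  induction fuel with
  | zero => intro i cnt; rfl
  | succ f ih =>
      intro i cnt
      simp only [lcpLoopA, PySem.List.pyGetD_natCast, List.getD_cons_succ]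
      split_ifs with h
      · exact ih (i+1) (cnt+1)
      · rfl

theorem lcpLoopA_add (a b : List Char) :
    ∀ (fuel i cnt : Nat), lcpLoopA a b i fuel (cnt+1) = lcpLoopA a b i fuel cnt + 1 := by
  intro fuel
  induction fuel with
  | zero => intro i cnt; rfl
  | succ f ih =>
      intro i cnt
      simp only [lcpLoopA]
      split_ifs with h
      · exact ih (i+1) (cnt+1)
      · rfl

-- A's counted loop + take  =  the structural common prefix
theorem take_lcpLoopA (a : List Char) :
    ∀ b : List Char, a.take (lcpLoopA a b 0 (min a.length b.length) 0) = lcpChars a b := by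
  induction a with
  | nil => intro b; cases b <;> rfl
  | cons c a ih =>
      intro b
      cases b with
      | nil => rfl
      | cons d b =>
          simp only [List.length_cons, Nat.succ_min_succ, lcpLoopA, lcpChars,
            PySem.List.pyGetD_natCast, List.getD_cons_zero]
          split_ifs with h
          · rw [lcpLoopA_shift, lcpLoopA_add, List.take_succ_cons, ih b, h]
          · rfl

-- ----- lexicographic order on List Char -----
theorem list_le_nil {a : List Char} (h : a ≤ []) : a = [] := by
  cases a with
  | nil => rfl
  | cons x a =>
      exfalso
      have hlt := lt_of_le_of_ne h (by simp)
      have hlex : List.Lex (· < ·) (x :: a) [] := hlt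
      cases hlex

theorem list_cons_le_cons {x y : Char} {a b : List Char} (h : (x :: a : List Char) ≤ y :: b) :
    x < y ∨ (x = y ∧ a ≤ b) := by
  rcases lt_or_eq_of_le h with h' | h'
  · have hlex : List.Lex (· < ·) (x :: a) (y :: b) := h'
    cases hlex with
    | cons h2 => exact Or.inr ⟨rfl, le_of_lt (show a < b from h2)⟩
    | rel h2 => exact Or.inl h2
  · injection h' with h1 h2
    exact Or.inr ⟨h1, le_of_eq h2⟩

-- the sandwich lemma: a ≤ b ≤ c ⇒ the common prefix of the extremes is a prefix of b
theorem lcpChars_prefix_of_between :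
    ∀ (b a c : List Char), a ≤ b → b ≤ c → lcpChars a c <+: b := by
  intro b
  induction b with
  | nil =>
      intro a c hab _
      rw [list_le_nil hab]
      cases c <;> simp [lcpChars]
  | cons y b ih =>
      intro a c hab hbc
      cases a with
      | nil => cases c <;> simp [lcpChars]
      | cons x a =>
          cases c with
          | nil => exact absurd (list_le_nil hbc) (by simp)
          | cons z c =>
              by_cases hxz : x = z
              · subst hxz
                rcases list_cons_le_cons hab with h1 | ⟨rfl, h1⟩
                · rcases list_cons_le_cons hbc with h2 | ⟨h2, _⟩
                  · exact absurd (h1.trans h2) (lt_irrefl x)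
                  · exact absurd (h2 ▸ h1) (lt_irrefl x)
                · rcases list_cons_le_cons hbc with h2 | ⟨_, h2⟩
                  · exact absurd h2 (lt_irrefl x)
                  · show lcpChars (x :: a) (x :: c) <+: x :: b
                    simp only [lcpChars]
                    exact List.cons_prefix_cons.mpr ⟨rfl, ih a c h1 h2⟩
              · simp [lcpChars, hxz]

-- the maximality lemma: any common prefix of a and c is a prefix of lcpChars a c
theorem prefix_lcpChars : ∀ (q a c : List Char), q <+: a → q <+: c → q <+: lcpChars a c := by
  intro q
  induction q with
  | nil => intro a c _ _; exact List.nil_prefix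
  | cons x q ih =>
      intro a c ha hc
      obtain ⟨ta, rfl⟩ := ha
      obtain ⟨tc, hc'⟩ := hc
      cases c with
      | nil => simp at hc'
      | cons z c =>
          injection hc' with h1 h2
          subst h1
          simp only [lcpChars, List.cons_append]
          exact (List.cons_prefix_cons).mpr ⟨rfl, ih _ c (List.prefix_append q ta) ⟨tc, h2⟩⟩

-- in a ≤-sorted list every element is ≤ the last one
theorem pairwise_le_getLast {l : List String} (hp : l.Pairwise (· ≤ ·)) (hne : l ≠ []) :
    ∀ x ∈ l, x ≤ l.getLast hne := by
  induction l with
  | nil => cases hne rfl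
  | cons c t ih =>
      intro x hx
      rcases List.mem_cons.mp hx with rfl | hx'
      · cases t with
        | nil => simp [List.getLast]
        | cons d t' =>
            have hcd : x ≤ d := (List.pairwise_cons.mp hp).1 d (List.mem_cons_self)
            have := ih (List.pairwise_cons.mp hp).2 (by simp) d List.mem_cons_self
            calc x ≤ d := hcd
              _ ≤ _ := by simpa [List.getLast] using this
      · cases t with
        | nil => cases hx'
        | cons d t' =>
            have := ih (List.pairwise_cons.mp hp).2 (by simp) x hx'
            simpa [List.getLast] using this

-- extending a one-column agreement: take i <+: m, same char at column i ⇒ take (i+1) <+: m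
theorem take_succ_prefix {l m : List Char} {i : Nat}
    (hi : i < l.length) (him : i < m.length)
    (hpre : l.take i <+: m) (hchar : m.getD i ' ' = l.getD i ' ') :
    l.take (i+1) <+: m := by
  have hlen : (l.take i).length = i := by simp [Nat.le_of_lt hi]
  have htake : l.take i = m.take i := by
    have := List.prefix_iff_eq_take.mp hpre
    rw [this, hlen]
  have hgl : l.getD i ' ' = l[i] := List.getD_eq_getElem l ' ' hi
  have hgm : m.getD i ' ' = m[i] := List.getD_eq_getElem m ' ' him
  have : l.take (i+1) = m.take (i+1) := by
    rw [List.take_succ, List.take_succ, htake]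
    congr 1
    rw [List.getElem?_eq_getElem hi, List.getElem?_eq_getElem him]
    simp only [Option.toList_some]
    rw [← hgl, ← hgm, hchar]
  rw [this]
  exact List.take_prefix _ _

-- B's while loop lands exactly on the longest common prefix P
theorem bLoop_eq_lcp (strs : List String) (first P : List Char)
    (hfP : ∀ j, first.take j <+: P → bCond strs first j = true → first.take (j+1) <+: P)
    (hstop : ∀ j, j < first.length → first.take j <+: P → bCond strs first j = false →
        first.take j = P)
    (hPf : P <+: first) :
    ∀ (fuel i : Nat), first.length + 1 ≤ i + fuel → first.take i <+: P →
      first.take (bLoop strs first i fuel) = P := by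
  intro fuel
  induction fuel with
  | zero =>
      intro i hfuel hinv
      have hfi : first.take i = first := List.take_of_length_le (by omega)
      rw [bLoop, hfi]
      exact ((hfi ▸ hinv).eq_of_length_le hPf.length_le).symm ▸ rfl
  | succ f ih =>
      intro i hfuel hinv
      rw [bLoop]
      by_cases hc : bCond strs first i = true
      · rw [if_pos hc]
        by_cases hil : i < first.length
        · exact ih (i+1) (by omega) (hfP i hinv hc)
        · -- guard i < len(first) inside bCond contradicts hc
          exfalso
          simp only [bCond, Bool.and_eq_true, decide_eq_true_eq] at hc
          omega
      · rw [if_neg hc]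
        by_cases hil : i < first.length
        · exact hstop i hil hinv (Bool.not_eq_true _ ▸ hc)
        · have hfi : first.take i = first := List.take_of_length_le (by omega)
          rw [hfi]
          exact ((hfi ▸ hinv).eq_of_length_le hPf.length_le).symm ▸ rfl

-- ===== VERDICT (by name: the statement is the Claim_ definition above) =====
theorem new_longest_common_prefix_spec : Claim_equal_new_longest_common_prefix := by
  intro strs _ hpre
  unfold Spec_new_longest_common_prefix new_longest_common_prefix new_longest_common_prefix_alt
  -- the sorted list is nonempty
  have hsne : PySem.List.sorted strs (fun x => x) false ≠ [] := by
    simpa [PySem.List.sorted_eq_nil_iff] using hpre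
  obtain ⟨h, t, hs⟩ := List.exists_cons_of_ne_nil hsne
  have hperm := PySem.List.sorted_perm strs (fun x => x) false
  set lastS := (PySem.List.sorted strs (fun x => x) false).getLast hsne with hlast_def
  -- every element of strs is sandwiched between h and lastS
  have hh_le : ∀ y ∈ strs, h ≤ y := PySem.List.key_head_sorted_le strs (fun x => x) hs
  have hle_last : ∀ y ∈ strs, y ≤ lastS := by
    intro y hy
    have hp : (PySem.List.sorted strs (fun x => x) false).Pairwise (· ≤ ·) := by
      simpa using PySem.List.sorted_pairwise (xs := strs) (key := fun x => x)
    exact pairwise_le_getLast hp hsne y (hperm.mem_iff.mpr hy)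
  have hh_mem : h ∈ strs := hperm.mem_iff.mp (by simp [hs])
  have hlast_mem : lastS ∈ strs := hperm.mem_iff.mp (List.getLast_mem hsne)
  -- P: the common prefix of the two extremes
  set P := lcpChars h.toList lastS.toList with hP_def
  -- P is a common prefix of every element of strs …
  have hPall : ∀ s ∈ strs, P <+: s.toList := by
    intro s hsmem
    exact lcpChars_prefix_of_between s.toList h.toList lastS.toList
      (String.le_iff_toList_le.mp (hh_le s hsmem))
      (String.le_iff_toList_le.mp (hle_last s hsmem))
  -- … and any list-of-chars that is a common prefix of every element is a prefix of P
  have hPmax : ∀ q : List Char, (∀ s ∈ strs, q <+: s.toList) → q <+: P := by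
    intro q hq
    exact prefix_lcpChars q h.toList lastS.toList (hq h hh_mem) (hq lastS hlast_mem)
  -- ---- A's side reduces to String.mk P ----
  have h0 : PySem.List.pyGetD (PySem.List.sorted strs (fun x => x) false) 0 "" = h := by
    rw [hs]; exact PySem.List.pyGetD_zero_cons h t ""
  have hm1 : PySem.List.pyGetD (PySem.List.sorted strs (fun x => x) false) (-1) "" = lastS :=
    PySem.List.pyGetD_neg_one _ "" hsne
  have hx : ((if PySem.Chars.len h.toList < PySem.Chars.len lastS.toList then
      PySem.Chars.len h.toList else PySem.Chars.len lastS.toList)).toNat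
      = min h.toList.length lastS.toList.length := by
    simp only [PySem.Chars.len]
    split_ifs with hab <;> omega
  simp only [h0, hm1]
  rw [hx, PySem.List.slice_zero_start, PySem.List.slice_to_natCast,
    take_lcpLoopA h.toList lastS.toList, ← hP_def]
  -- ---- B's side reduces to String.mk P ----
  obtain ⟨f0, rest, rfl⟩ := List.exists_cons_of_ne_nil hpre
  have hf0 : PySem.List.pyGetD (f0 :: rest) 0 "" = f0 := PySem.List.pyGetD_zero_cons f0 rest ""
  simp only [hf0]
  have hPf : P <+: f0.toList := hPall f0 List.mem_cons_self
  -- step lemma for the loop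
  have hfP : ∀ j, f0.toList.take j <+: P → bCond (f0 :: rest) f0.toList j = true →
      f0.toList.take (j+1) <+: P := by
    intro j hinv hc
    simp only [bCond, Bool.and_eq_true, decide_eq_true_eq, List.all_eq_true, beq_iff_eq] at hc
    obtain ⟨hjl, hall⟩ := hc
    refine hPmax _ (fun s hsmem => ?_)
    obtain ⟨hjs, hchar⟩ := hall s hsmem
    exact take_succ_prefix hjl hjs (hinv.trans (hPall s hsmem)) hchar
  -- stop lemma for the loop
  have hstop : ∀ j, j < f0.toList.length → f0.toList.take j <+: P →
      bCond (f0 :: rest) f0.toList j = false → f0.toList.take j = P := by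
    intro j hjl hinv hc
    have hPj : P.length ≤ j := by
      by_contra hgt
      push_neg at hgt
      have hc' : bCond (f0 :: rest) f0.toList j = true := by
        simp only [bCond, Bool.and_eq_true, decide_eq_true_eq, List.all_eq_true, beq_iff_eq]
        refine ⟨hjl, fun s hsmem => ?_⟩
        have hps := hPall s hsmem
        have hjs : j < s.toList.length := lt_of_lt_of_le hgt hps.length_le
        constructor
        · exact hjs
        · have h1 : s.toList.getD j ' ' = P.getD j ' ' := by
            rw [List.getD_eq_getElem s.toList ' ' hjs, List.getD_eq_getElem P ' ' hgt]
            exact (hps.getElem hgt).symm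
          have h2 : f0.toList.getD j ' ' = P.getD j ' ' := by
            rw [List.getD_eq_getElem f0.toList ' ' hjl, List.getD_eq_getElem P ' ' hgt]
            exact (hPf.getElem hgt).symm
          rw [h1, h2]
      rw [hc'] at hc; cases hc
    have hlen : (f0.toList.take j).length = j := by rw [List.length_take]; omega
    have h3 := hinv.length_le
    exact hinv.eq_of_length (by omega)
  have := bLoop_eq_lcp (f0 :: rest) f0.toList P hfP hstop hPf (f0.toList.length + 1) 0
    (by omega) (by simp)
  rw [this]
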